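-- pv_equiv track=rewrite | github.com/Hamulda/new-hledac | utils/semantic.py | extract_matching_keywords
-- ===== SOURCE A (Python) =====
-- from typing import Optional, Dict, Any, List, Tuple
--
-- def extract_matching_keywords(
--
--     content: str,
--     keywords: List[str]
-- ) -> List[str]:
--     """
--     Extract keywords that appear in content.
--
--     Args:
--         content: Content to extract from
--         keywords: List of keywords to check
--
--     Returns:
--         List of matching keywords
--     """
--     content_lower = content.lower()
--     matches = []
--
--     for keyword in keywords:
--         if keyword.lower() in content_lower:
--             matches.append(keyword)
--
--     return matches
-- ===== SOURCE B (Python) =====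
-- def extract_matching_keywords(content, keywords):
--     # Position-major scan with a length-indexed hash of keywords: group the
--     # lowered keywords by length once, slide over every start position of the
--     # lowered content taking one slice per distinct keyword length, and collect
--     # the slices that are keywords; finally filter the original list.
--     content_lower = content.lower()
--     lowered = [kw.lower() for kw in keywords]
--     groups = {}
--     for lk in lowered:
--         s = groups.get(len(lk), set())
--         s.add(lk)
--         groups[len(lk)] = s
--     found = set()
--     for i in range(len(content_lower) + 1):
--         for length, group in groups.items():
--             seg = content_lower[i:i+length]
--             if len(seg) == length and seg in group:
--                 found.add(seg)
--     return [kw for kw, lk in zip(keywords, lowered) if lk in found]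
-- ===== Notes on version B (the rewrite author's own statement) =====
-- stated objective: alternative
-- what changed: B replaces A's per-keyword substring search by one position-major scan of the content: lowered keywords are grouped by length into hash sets once, each start position contributes one fixed-length slice per distinct keyword length which is looked up in the corresponding set, and the original list is finally filtered against the found set.
import Mathlib
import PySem

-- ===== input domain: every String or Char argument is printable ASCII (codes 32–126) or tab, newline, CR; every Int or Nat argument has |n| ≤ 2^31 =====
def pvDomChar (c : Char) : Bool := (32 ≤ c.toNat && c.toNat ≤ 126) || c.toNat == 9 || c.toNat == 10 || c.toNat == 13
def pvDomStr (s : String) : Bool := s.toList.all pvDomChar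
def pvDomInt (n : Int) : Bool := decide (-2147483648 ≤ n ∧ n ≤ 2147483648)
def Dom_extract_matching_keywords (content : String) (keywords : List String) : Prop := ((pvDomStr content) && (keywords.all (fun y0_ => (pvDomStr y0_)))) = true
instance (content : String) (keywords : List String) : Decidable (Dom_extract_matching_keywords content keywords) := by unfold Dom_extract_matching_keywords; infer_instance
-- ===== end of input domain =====

-- B replaces A's per-keyword substring search by a single position-major scan of the content
-- using length-grouped hash sets of the lowered keywords (a different algorithm).

-- ===== PORT A =====
-- Literal port of A: lower the content, then one loop appending each keyword whose
-- lowered form occurs as a substring of the lowered content.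
def extract_matching_keywords (content : String) (keywords : List String) : List String :=
  let content_lower := PySem.Str.lower content
  keywords.foldl
    (fun acc kw =>
      if PySem.Str.isIn (PySem.Str.lower kw) content_lower then acc ++ [kw] else acc)
    []

-- ===== PORT B =====
-- Literal port of B: group the lowered keywords by length into sets; for every start
-- position of the lowered content take one slice per distinct length and, when it is a
-- full-length slice lying in its group, add it to the found set; filter the original list.
def extract_matching_keywords_alt (content : String) (keywords : List String) : List String :=
  let content_lower := PySem.Str.lower content
  let lowered := keywords.map (fun kw => PySem.Str.lower kw)
  let groups := lowered.foldl
      (fun g lk =>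
        PySem.Dict.modify g (PySem.Str.len lk) PySem.Set.empty
          (fun s => PySem.Set.add s lk))
      PySem.Dict.empty
  let found := (PySem.List.pyRange 0 (PySem.Str.len content_lower + 1) 1).foldl
      (fun fnd i =>
        groups.items.foldl
          (fun f p =>
            let seg := PySem.Str.slice content_lower (some i) (some (i + p.1))
            if (PySem.Str.len seg == p.1) && PySem.Set.contains p.2 seg
            then PySem.Set.add f seg else f) fnd)
      PySem.Set.empty
  ((keywords.zip lowered).filter (fun p => PySem.Set.contains found p.2)).map (fun p => p.1)

-- ===== PRECONDITION & SPEC =====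
def Spec_extract_matching_keywords (content : String) (keywords : List String) (out : List String) : Prop := out = extract_matching_keywords_alt content keywords
instance (content : String) (keywords : List String) (out : List String) : Decidable (Spec_extract_matching_keywords content keywords out) := by unfold Spec_extract_matching_keywords; infer_instance

-- ===== CLAIM =====
def Claim_equal_extract_matching_keywords : Prop := ∀ (content : String) (keywords : List String), Dom_extract_matching_keywords content keywords → Spec_extract_matching_keywords content keywords (extract_matching_keywords content keywords)

-- ===== LEMMAS AND PROOFS =====

theorem pv_len_eq (s : String) : PySem.Str.len s = (s.toList.length : Int) := by
  simp [PySem.Str.len]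

theorem pv_zip_map_self {α β : Type} (l : List α) (f : α → β) :
    l.zip (l.map f) = l.map (fun x => (x, f x)) := by
  induction l with
  | nil => rfl
  | cons a t ih => simpa [List.zip] using ih

-- membership in a group of the length-indexed dictionary built from the lowered keywords
theorem pv_mem_getD_build (l : List String) (g : PySem.Dict Int (PySem.Set String))
    (L : Int) (x : String) :
    x ∈ (l.foldl
          (fun g lk =>
            PySem.Dict.modify g (PySem.Str.len lk) PySem.Set.empty
              (fun s => PySem.Set.add s lk)) g).getD L PySem.Set.empty
      ↔ x ∈ g.getD L PySem.Set.empty ∨ (x ∈ l ∧ PySem.Str.len x = L) := by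
  induction l generalizing g with
  | nil => simp
  | cons a t ih =>
    rw [List.foldl_cons, ih, PySem.Dict.getD_modify]
    by_cases hL : L = PySem.Str.len a
    · rw [if_pos hL, PySem.Set.mem_add]
      subst hL
      constructor
      · rintro (⟨h | rfl⟩ | ⟨hx, hlen⟩)
        · exact Or.inl h
        · exact Or.inr ⟨List.mem_cons_self .., rfl⟩
        · exact Or.inr ⟨List.mem_cons_of_mem _ hx, hlen⟩
      · rintro (h | ⟨hx, hlen⟩)
        · exact Or.inl (Or.inl h)
        · rcases List.mem_cons.mp hx with rfl | hx
          · exact Or.inl (Or.inr rfl)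
          · exact Or.inr ⟨hx, hlen⟩
    · rw [if_neg hL]
      constructor
      · rintro (h | ⟨hx, hlen⟩)
        · exact Or.inl h
        · exact Or.inr ⟨List.mem_cons_of_mem _ hx, hlen⟩
      · rintro (h | ⟨hx, hlen⟩)
        · exact Or.inl h
        · rcases List.mem_cons.mp hx with rfl | hx
          · exact absurd hlen.symm hL
          · exact Or.inr ⟨hx, hlen⟩

-- the built dictionary has unique keys
theorem pv_nodup_keys_build (l : List String) (g : PySem.Dict Int (PySem.Set String))
    (hg : g.keys.Nodup) :
    (l.foldl
        (fun g lk =>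
          PySem.Dict.modify g (PySem.Str.len lk) PySem.Set.empty
            (fun s => PySem.Set.add s lk)) g).keys.Nodup := by
  induction l generalizing g with
  | nil => exact hg
  | cons a t ih =>
    rw [List.foldl_cons]
    refine ih _ ?_
    rw [PySem.Dict.keys_modify]
    exact PySem.Dict.nodup_keys_insert _ _ _ hg

-- a successful lookup produces a pair of the items list
theorem pv_get?_mem_items {κ ν : Type} [BEq κ] [LawfulBEq κ]
    (d : PySem.Dict κ ν) (k : κ) (v : ν) (h : d.get? k = some v) :
    (k, v) ∈ d.items := by
  unfold PySem.Dict.get? at h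
  rcases Option.map_eq_some_iff.mp h with ⟨p, hp, rfl⟩
  have h1 : p.1 = k := by
    have := List.find?_some hp
    simpa using this
  have h2 : p ∈ d.items := List.mem_of_find?_eq_some hp
  have : (k, p.2) = p := by
    rw [← h1]
  rw [this]
  exact h2

-- membership after the inner loop over the grouped items at one position
theorem pv_inner_mem (items : List (Int × PySem.Set String)) (cl : String) (i : Int)
    (f : PySem.Set String) (y : String) :
    y ∈ items.foldl
        (fun f p =>
          if (PySem.Str.len (PySem.Str.slice cl (some i) (some (i + p.1))) == p.1) &&
              PySem.Set.contains p.2 (PySem.Str.slice cl (some i) (some (i + p.1)))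
          then PySem.Set.add f (PySem.Str.slice cl (some i) (some (i + p.1))) else f) f
      ↔ y ∈ f ∨ ∃ p ∈ items,
          ((PySem.Str.len (PySem.Str.slice cl (some i) (some (i + p.1))) == p.1) &&
            PySem.Set.contains p.2 (PySem.Str.slice cl (some i) (some (i + p.1)))) = true ∧
          PySem.Str.slice cl (some i) (some (i + p.1)) = y := by
  induction items generalizing f with
  | nil => simp
  | cons a t ih =>
    rw [List.foldl_cons]
    by_cases hc : ((PySem.Str.len (PySem.Str.slice cl (some i) (some (i + a.1))) == a.1) &&
        PySem.Set.contains a.2 (PySem.Str.slice cl (some i) (some (i + a.1)))) = true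
    · rw [if_pos hc, ih]
      rw [PySem.Set.mem_add]
      constructor
      · rintro (⟨h | rfl⟩ | ⟨p, hp, hcp, hv⟩)
        · exact Or.inl h
        · exact Or.inr ⟨a, List.mem_cons_self .., hc, rfl⟩
        · exact Or.inr ⟨p, List.mem_cons_of_mem _ hp, hcp, hv⟩
      · rintro (h | ⟨p, hp, hcp, hv⟩)
        · exact Or.inl (Or.inl h)
        · rcases List.mem_cons.mp hp with rfl | hp
          · exact Or.inl (Or.inr hv.symm)
          · exact Or.inr ⟨p, hp, hcp, hv⟩
    · rw [if_neg hc, ih]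
      constructor
      · rintro (h | ⟨p, hp, hcp, hv⟩)
        · exact Or.inl h
        · exact Or.inr ⟨p, List.mem_cons_of_mem _ hp, hcp, hv⟩
      · rintro (h | ⟨p, hp, hcp, hv⟩)
        · exact Or.inl h
        · rcases List.mem_cons.mp hp with rfl | hp
          · exact absurd hcp hc
          · exact Or.inr ⟨p, hp, hcp, hv⟩

-- membership after the outer loop over the list of start positions
theorem pv_outer_mem (items : List (Int × PySem.Set String)) (cl : String)
    (is : List Int) (f : PySem.Set String) (y : String) :
    y ∈ is.foldl
        (fun fnd i =>
          items.foldl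
            (fun f p =>
              if (PySem.Str.len (PySem.Str.slice cl (some i) (some (i + p.1))) == p.1) &&
                  PySem.Set.contains p.2 (PySem.Str.slice cl (some i) (some (i + p.1)))
              then PySem.Set.add f (PySem.Str.slice cl (some i) (some (i + p.1))) else f)
            fnd) f
      ↔ y ∈ f ∨ ∃ i ∈ is, ∃ p ∈ items,
          ((PySem.Str.len (PySem.Str.slice cl (some i) (some (i + p.1))) == p.1) &&
            PySem.Set.contains p.2 (PySem.Str.slice cl (some i) (some (i + p.1)))) = true ∧
          PySem.Str.slice cl (some i) (some (i + p.1)) = y := by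
  induction is generalizing f with
  | nil => simp
  | cons i t ih =>
    rw [List.foldl_cons, ih, pv_inner_mem]
    constructor
    · rintro (⟨h | ⟨p, hp, hcp, hv⟩⟩ | ⟨j, hj, hrest⟩)
      · exact Or.inl h
      · exact Or.inr ⟨i, List.mem_cons_self .., p, hp, hcp, hv⟩
      · exact Or.inr ⟨j, List.mem_cons_of_mem _ hj, hrest⟩
    · rintro (h | ⟨j, hj, hrest⟩)
      · exact Or.inl (Or.inl h)
      · rcases List.mem_cons.mp hj with rfl | hj
        · exact Or.inl (Or.inr hrest)
        · exact Or.inr ⟨j, hj, hrest⟩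

-- the scan over all positions with the length-grouped sets finds exactly the lowered
-- keywords occurring as substrings of the lowered content
theorem pv_core (cl : String) (lowered : List String) (y : String) :
    (∃ i ∈ PySem.List.pyRange 0 (PySem.Str.len cl + 1) 1,
      ∃ p ∈ (lowered.foldl
          (fun g lk =>
            PySem.Dict.modify g (PySem.Str.len lk) PySem.Set.empty
              (fun s => PySem.Set.add s lk)) PySem.Dict.empty).items,
        ((PySem.Str.len (PySem.Str.slice cl (some i) (some (i + p.1))) == p.1) &&
          PySem.Set.contains p.2 (PySem.Str.slice cl (some i) (some (i + p.1)))) = true ∧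
        PySem.Str.slice cl (some i) (some (i + p.1)) = y)
      ↔ (y ∈ lowered ∧ PySem.Str.isIn y cl = true) := by
  constructor
  · rintro ⟨i, hi, p, hp, hc, hv⟩
    rcases Bool.and_eq_true_iff.mp hc with ⟨-, hcont⟩
    rcases PySem.List.mem_pyRange_one.mp hi with ⟨h0, -⟩
    -- the group p.2 holds only lowered keywords of length p.1
    have hnodup : ((lowered.foldl
        (fun g lk =>
          PySem.Dict.modify g (PySem.Str.len lk) PySem.Set.empty
            (fun s => PySem.Set.add s lk)) PySem.Dict.empty)).keys.Nodup :=
      pv_nodup_keys_build lowered PySem.Dict.empty (by simp [PySem.Dict.empty, PySem.Dict.keys])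
    have hget := PySem.Dict.get?_of_mem_items _ (by simpa using hp) hnodup
    have hgetD : (lowered.foldl
        (fun g lk =>
          PySem.Dict.modify g (PySem.Str.len lk) PySem.Set.empty
            (fun s => PySem.Set.add s lk)) PySem.Dict.empty).getD p.1 PySem.Set.empty = p.2 := by
      rw [PySem.Dict.getD_eq_get?_getD, hget]; rfl
    have hmemgrp : PySem.Str.slice cl (some i) (some (i + p.1)) ∈ p.2 :=
      (PySem.Set.contains_iff _ _).mp hcont
    have hseg := (pv_mem_getD_build lowered PySem.Dict.empty p.1
        (PySem.Str.slice cl (some i) (some (i + p.1)))).mp (by rw [hgetD]; exact hmemgrp)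
    rcases hseg with hseg | ⟨hmem, hlen⟩
    · simp [PySem.Dict.getD_empty, PySem.Set.empty] at hseg
    · refine ⟨hv ▸ hmem, ?_⟩
      rw [PySem.Str.isIn_eq, ← PySem.Chars.exists_prefix_drop_iff_isIn]
      obtain ⟨m, hm⟩ : ∃ m : Nat, p.1 = (m : Int) :=
        ⟨(PySem.Str.slice cl (some i) (some (i + p.1))).toList.length,
          ((pv_len_eq _).symm.trans hlen).symm⟩
      have hlist : (PySem.Str.slice cl (some i) (some (i + p.1))).toList
          = List.take m (List.drop i.toNat cl.toList) := by
        rw [PySem.Str.toList_slice, PySem.Chars.slice_eq_listSlice]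
        have hi' : i = ((i.toNat : Nat) : Int) := by omega
        conv_lhs => rw [hm, hi']
        rw [PySem.List.slice_natCast_add]
      refine ⟨i.toNat, ?_⟩
      rw [← hv, hlist]
      exact List.take_prefix _ _
  · rintro ⟨hy, hIn⟩
    rw [PySem.Str.isIn_eq, ← PySem.Chars.exists_prefix_drop_iff_isIn] at hIn
    rcases hIn with ⟨j0, hj0⟩
    -- normalise the position to lie within the content
    have hj : ∃ j, j ≤ cl.toList.length ∧ y.toList <+: List.drop j cl.toList := by
      by_cases hle : j0 ≤ cl.toList.length
      · exact ⟨j0, hle, hj0⟩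
      · refine ⟨cl.toList.length, le_refl _, ?_⟩
        rw [List.drop_eq_nil_of_le (by omega)] at hj0
        rw [List.drop_length]
        exact hj0
    rcases hj with ⟨j, hjle, hjpre⟩
    -- the group at y's length
    have hmemD := (pv_mem_getD_build lowered PySem.Dict.empty (PySem.Str.len y) y).mpr
      (Or.inr ⟨hy, rfl⟩)
    rcases hg : (lowered.foldl
        (fun g lk =>
          PySem.Dict.modify g (PySem.Str.len lk) PySem.Set.empty
            (fun s => PySem.Set.add s lk)) PySem.Dict.empty).get? (PySem.Str.len y) with
      _ | grp
    · rw [PySem.Dict.getD_eq_get?_getD, hg] at hmemD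
      simp [PySem.Set.empty] at hmemD
    · have hpitem : (PySem.Str.len y, grp) ∈ (lowered.foldl
          (fun g lk =>
            PySem.Dict.modify g (PySem.Str.len lk) PySem.Set.empty
              (fun s => PySem.Set.add s lk)) PySem.Dict.empty).items :=
        pv_get?_mem_items _ _ _ hg
      have hygrp : y ∈ grp := by
        rw [PySem.Dict.getD_eq_get?_getD, hg] at hmemD
        exact hmemD
      have hseg : (PySem.Str.slice cl (some (j : Int))
          (some ((j : Int) + (PySem.Str.len y, grp).1))).toList = y.toList := by
        rw [PySem.Str.toList_slice, PySem.Chars.slice_eq_listSlice]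
        have hm : (PySem.Str.len y, grp).1 = ((y.toList.length : Nat) : Int) := pv_len_eq y
        rw [hm, PySem.List.slice_natCast_add]
        rcases hjpre with ⟨t, ht⟩
        rw [← ht, List.take_left]
      have hsegy : PySem.Str.slice cl (some (j : Int))
          (some ((j : Int) + (PySem.Str.len y, grp).1)) = y := String.toList_inj.mp hseg
      refine ⟨(j : Int), ?_, (PySem.Str.len y, grp), hpitem, ?_, hsegy⟩
      · exact PySem.List.mem_pyRange_one.mpr ⟨by omega, by rw [pv_len_eq]; omega⟩
      · rw [hsegy]
        refine Bool.and_eq_true_iff.mpr ⟨?_, ?_⟩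
        · exact beq_iff_eq.mpr rfl
        · exact (PySem.Set.contains_iff _ _).mpr hygrp

-- ===== VERDICT =====
theorem extract_matching_keywords_spec : Claim_equal_extract_matching_keywords := by
  intro content keywords _
  unfold Spec_extract_matching_keywords extract_matching_keywords extract_matching_keywords_alt
  dsimp only
  rw [PySem.List.foldl_append_if_eq_filter, pv_zip_map_self, List.filter_map, List.map_map]
  simp only [List.nil_append, Function.comp_def]
  rw [List.map_id'']
  · exact List.filter_congr fun kw hkw => by
      have hmem : PySem.Str.lower kw ∈ keywords.map (fun kw => PySem.Str.lower kw) :=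
        List.mem_map_of_mem hkw
      have h1 := pv_outer_mem
          ((keywords.map (fun kw => PySem.Str.lower kw)).foldl
            (fun g lk =>
              PySem.Dict.modify g (PySem.Str.len lk) PySem.Set.empty
                (fun s => PySem.Set.add s lk)) PySem.Dict.empty).items
          (PySem.Str.lower content)
          (PySem.List.pyRange 0 (PySem.Str.len (PySem.Str.lower content) + 1) 1)
          PySem.Set.empty (PySem.Str.lower kw)
      rw [pv_core (PySem.Str.lower content) (keywords.map (fun kw => PySem.Str.lower kw))
        (PySem.Str.lower kw)] at h1
      have hiff : PySem.Set.contains _ (PySem.Str.lower kw) = true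
          ↔ PySem.Str.isIn (PySem.Str.lower kw) (PySem.Str.lower content) = true :=
        (PySem.Set.contains_iff _ _).trans (h1.trans (by
          constructor
          · rintro (h0 | ⟨-, hx⟩)
            · simp [PySem.Set.empty] at h0
            · exact hx
          · intro hx; exact Or.inr ⟨hmem, hx⟩))
      exact (Bool.eq_iff_iff.mpr hiff).symm
  · exact fun _ => rfl
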